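-- pv_equiv track=rewrite | github.com/dipanka-500/medical | mediscan_v70_sota_production/mediscan_v70/kaggle_mediscan_v70.py | _find_positive_keywords
-- ===== SOURCE A (Python) =====
-- NEGATION_PHRASES = [
--     "no evidence of", "no sign of", "no signs of", "without evidence of",
--     "without", "no", "not", "none", "absent", "negative for",
--     "rules out", "ruled out", "rule out", "no definite", "no acute",
--     "no significant", "denies", "denied", "unremarkable for",
--     "not suggestive of", "not consistent with", "not compatible with",
--     "no convincing", "no demonstrable", "no appreciable", "no focal",
--     "no gross", "no obvious", "unlikely", "low probability of",
--     "resolved", "clear of", "free of", "free from",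
-- ]
--
-- def _is_negated(text, keyword, window_words=8):
--     """Check if keyword is negated — scans 8-word window before each occurrence.
--     v5.1: Contrastive conjunctions (but, however) break negation scope."""
--     text_lower = text.lower()
--     kw_lower = keyword.lower()
--     start = 0
--     found_any = False
--     while True:
--         idx = text_lower.find(kw_lower, start)
--         if idx == -1: break
--         found_any = True
--         # Find sentence boundary
--         r1 = text_lower.rfind(". ", 0, idx); r2 = text_lower.rfind(".\n", 0, idx)
--         sent_start = max(r1 + 2 if r1 >= 0 else 0, r2 + 2 if r2 >= 0 else 0, 0)
--         prefix = text_lower[sent_start:idx].strip()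
--         # Contrastive conjunctions break negation scope
--         conjs = ["but", "however", "although", "though", "yet", "while"]
--         pw = prefix.split()
--         for i, w in enumerate(pw):
--             if w.strip(",.;:") in conjs: prefix = " ".join(pw[i+1:]); break
--         window = " ".join(prefix.split()[-window_words:]) if prefix else ""
--         if not any(neg in window for neg in NEGATION_PHRASES):
--             return False  # non-negated occurrence found
--         start = idx + len(kw_lower)
--     return True
--
-- def _find_positive_keywords(text, keywords):
--     """Partition keywords into (positive, negated) based on context."""
--     text_lower = text.lower()
--     positive, negated = [], []
--     for kw in keywords:
--         if kw.lower() not in text_lower: continue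
--         if _is_negated(text_lower, kw.lower()): negated.append(kw)
--         else: positive.append(kw)
--     return positive, negated
-- ===== SOURCE B (Python) =====
-- NEGATION_PHRASES = [
--     "no evidence of", "no sign of", "no signs of", "without evidence of",
--     "without", "no", "not", "none", "absent", "negative for",
--     "rules out", "ruled out", "rule out", "no definite", "no acute",
--     "no significant", "denies", "denied", "unremarkable for",
--     "not suggestive of", "not consistent with", "not compatible with",
--     "no convincing", "no demonstrable", "no appreciable", "no focal",
--     "no gross", "no obvious", "unlikely", "low probability of",
--     "resolved", "clear of", "free of", "free from",
-- ]
--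
-- _CONJS = ("but", "however", "although", "though", "yet", "while")
--
--
-- def _sentence_starts(tl):
--     """One linear pass: the start offset of every sentence (0 plus the offset
--     just after each '. ' / '.\\n' separator), in increasing order."""
--     starts = [0]
--     for p in range(len(tl) - 1):
--         if tl[p] == '.' and (tl[p + 1] == ' ' or tl[p + 1] == '\n'):
--             starts.append(p + 2)
--     return starts
--
--
-- def _sentence_start_at(starts, idx):
--     """Greatest recorded sentence start <= idx (the span list is ascending)."""
--     s = 0
--     for s0 in starts:
--         if s0 > idx:
--             break
--         s = s0
--     return s
--
--
-- def _window(tl, s, idx):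
--     """Conjunction-broken last-8-word window of tl[s:idx]."""
--     words = tl[s:idx].split()
--     for j, w in enumerate(words):
--         if w.strip(",.;:") in _CONJS:
--             words = words[j + 1:]
--             break
--     return " ".join(words[-8:])
--
--
-- def _find_positive_keywords(text, keywords):
--     """Partition keywords into (positive, negated) based on context."""
--     tl = text.lower()
--     starts = _sentence_starts(tl)
--     positive, negated = [], []
--     for kw in keywords:
--         k = kw.lower()
--         bucket = None
--         pos = 0
--         while True:
--             i = tl.find(k, pos)
--             if i < 0:
--                 break
--             w = _window(tl, _sentence_start_at(starts, i), i)
--             if any(n in w for n in NEGATION_PHRASES):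
--                 bucket = negated
--                 pos = i + len(k)
--             else:
--                 bucket = positive
--                 break
--         if bucket is not None:
--             bucket.append(kw)
--     return positive, negated
-- ===== Notes on version B (the rewrite author's own statement) =====
-- stated objective: alternative
-- what changed: B builds a sentence-start span list in one linear pass and locates each occurrence's sentence in that index (instead of A's two rfind scans per occurrence), fuses A's separate containment test and _is_negated find-loop into a single find-loop with a tri-state verdict, and builds the window by slicing the word list after the first conjunction instead of A's strip/re-join/re-split pipeline.
import Mathlib
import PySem

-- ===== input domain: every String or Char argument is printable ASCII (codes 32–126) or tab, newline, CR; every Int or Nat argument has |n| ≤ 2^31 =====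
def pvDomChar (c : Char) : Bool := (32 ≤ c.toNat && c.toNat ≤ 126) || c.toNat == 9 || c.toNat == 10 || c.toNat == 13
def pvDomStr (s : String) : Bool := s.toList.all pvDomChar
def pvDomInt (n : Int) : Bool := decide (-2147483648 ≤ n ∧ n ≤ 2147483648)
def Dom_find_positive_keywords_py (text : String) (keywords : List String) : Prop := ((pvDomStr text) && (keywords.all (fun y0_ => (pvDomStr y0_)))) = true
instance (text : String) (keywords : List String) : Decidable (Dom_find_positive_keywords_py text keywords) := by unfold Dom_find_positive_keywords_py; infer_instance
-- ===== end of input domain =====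

-- B is an ALTERNATIVE decomposition (same result, no speed claim): it builds a sentence-start
-- span list once and looks each occurrence's sentence up in it (A runs two rfind scans per
-- occurrence), fuses A's containment test and negation find-loop into one loop with a
-- tri-state verdict, and slices the word list after the first conjunction instead of A's
-- strip/re-join/re-split pipeline.

-- Module-level constants shared by both Pythons (same module in the source).
def pvNegPhrases : List (List Char) :=
  ["no evidence of".toList, "no sign of".toList, "no signs of".toList, "without evidence of".toList,
   "without".toList, "no".toList, "not".toList, "none".toList, "absent".toList, "negative for".toList,
   "rules out".toList, "ruled out".toList, "rule out".toList, "no definite".toList, "no acute".toList,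
   "no significant".toList, "denies".toList, "denied".toList, "unremarkable for".toList,
   "not suggestive of".toList, "not consistent with".toList, "not compatible with".toList,
   "no convincing".toList, "no demonstrable".toList, "no appreciable".toList, "no focal".toList,
   "no gross".toList, "no obvious".toList, "unlikely".toList, "low probability of".toList,
   "resolved".toList, "clear of".toList, "free of".toList, "free from".toList]

def pvConjs : List (List Char) :=
  ["but".toList, "however".toList, "although".toList, "though".toList, "yet".toList, "while".toList]

-- ===== PORT A =====

-- A's 'for i, w in enumerate(pw): if w.strip(",.;:") in conjs: prefix = " ".join(pw[i+1:]); break'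
def pvConjLoopA (pfx : List Char) : List (List Char) → List Char
  | [] => pfx
  | w :: rest =>
    if pvConjs.contains (PySem.Chars.stripChars w (",.;:".toList)) then
      PySem.Chars.join (" ".toList) rest
    else pvConjLoopA pfx rest

-- A's sentence-boundary + prefix + conjunction-break + last-8-words window (the body of A's loop).
def pvWindowA (t : List Char) (idx : Nat) : List Char :=
  let r1 := PySem.Chars.rfindFrom t (". ".toList) 0 (some (idx : Int))
  let r2 := PySem.Chars.rfindFrom t (".\n".toList) 0 (some (idx : Int))
  let sentStart := max (if 0 ≤ r1 then r1 + 2 else 0) (max (if 0 ≤ r2 then r2 + 2 else 0) 0)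
  let pfx := PySem.Chars.strip (PySem.List.slice t (some sentStart) (some (idx : Int)))
  let pfx' := pvConjLoopA pfx (PySem.Chars.split₀ pfx)
  if pfx' = [] then []
  else PySem.Chars.join (" ".toList) (PySem.List.slice (PySem.Chars.split₀ pfx') (some (-8)) none)

-- A's 'while True: idx = find(kw, start); …' loop of _is_negated (found_any is dead in A).
-- The guard 'h' only makes the recursion total; Python reaches the recursive call only when it holds.
def pvNegLoopA (t kw : List Char) (start : Nat) : Bool :=
  let idx := PySem.Chars.findFrom t kw (start : Int) none
  if idx = -1 then true
  else
    let window := pvWindowA t idx.toNat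
    if pvNegPhrases.any (fun neg => PySem.Chars.isIn neg window) then
      if h : start < idx.toNat + kw.length ∧ start ≤ t.length then
        pvNegLoopA t kw (idx.toNat + kw.length)
      else true
    else false
termination_by t.length + 1 - start
decreasing_by omega

-- _is_negated(text, keyword): lowers both arguments again, then runs the loop from 0.
def pvIsNegA (t kw : List Char) : Bool :=
  pvNegLoopA (PySem.Chars.lower t) (PySem.Chars.lower kw) 0

def find_positive_keywords_py (text : String) (keywords : List String) : List String × List String :=
  let tl := PySem.Chars.lower text.toList
  keywords.foldl
    (fun acc kw =>
      let kl := PySem.Chars.lower kw.toList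
      if PySem.Chars.isIn kl tl then
        if pvIsNegA tl kl then (acc.1, acc.2 ++ [kw]) else (acc.1 ++ [kw], acc.2)
      else acc)
    ([], [])

-- ===== PORT B =====

-- B: one linear pass recording every sentence start (0 and each offset just after '. ' / '.\n').
def pvStartsB (t : List Char) : List Nat :=
  (PySem.List.pyRange 0 ((t.length : Int) - 1) 1).foldl
    (fun acc p =>
      if PySem.List.pyGetD t p ' ' == '.' &&
         (PySem.List.pyGetD t (p + 1) ' ' == ' ' || PySem.List.pyGetD t (p + 1) ' ' == '\n') then
        acc ++ [p.toNat + 2]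
      else acc)
    [0]

-- B: greatest recorded sentence start ≤ idx ('for s0 in starts: if s0 > idx: break; s = s0').
def pvLookupB (idx : Nat) : List Nat → Nat → Nat
  | [], s => s
  | s0 :: rest, s => if idx < s0 then s else pvLookupB idx rest s0

-- B: 'for j, w in enumerate(words): if w.strip(",.;:") in _CONJS: words = words[j+1:]; break'
def pvConjTailB : List (List Char) → Option (List (List Char))
  | [] => none
  | w :: rest =>
    if pvConjs.contains (PySem.Chars.stripChars w (",.;:".toList)) then some rest
    else pvConjTailB rest

-- B's window: split tl[s:idx], cut at the first conjunction, join the last 8 words.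
def pvWindowB (t : List Char) (s idx : Nat) : List Char :=
  let ws := PySem.Chars.split₀ (PySem.List.slice t (some (s : Int)) (some (idx : Int)))
  let tail := match pvConjTailB ws with
              | none => ws
              | some r => r
  PySem.Chars.join (" ".toList) (PySem.List.slice tail (some (-8)) none)

-- B's fused 'while True' loop; bucket: none = not found, some true = negated, some false = positive.
-- The guard 'h' only makes the recursion total; Python reaches the recursive call only when it holds.
def pvLoopB (t kw : List Char) (starts : List Nat) (pos : Nat) (bucket : Option Bool) : Option Bool :=
  let i := PySem.Chars.findFrom t kw (pos : Int) none
  if i = -1 then bucket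
  else
    if pvNegPhrases.any (fun neg =>
         PySem.Chars.isIn neg (pvWindowB t (pvLookupB i.toNat starts 0) i.toNat)) then
      if h : pos < i.toNat + kw.length ∧ pos ≤ t.length then
        pvLoopB t kw starts (i.toNat + kw.length) (some true)
      else some true
    else some false
termination_by t.length + 1 - pos
decreasing_by omega

def find_positive_keywords_py_alt (text : String) (keywords : List String) : List String × List String :=
  let tl := PySem.Chars.lower text.toList
  let starts := pvStartsB tl
  keywords.foldl
    (fun acc kw =>
      match pvLoopB tl (PySem.Chars.lower kw.toList) starts 0 none with
      | none => acc
      | some true => (acc.1, acc.2 ++ [kw])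
      | some false => (acc.1 ++ [kw], acc.2))
    ([], [])

-- ===== PRECONDITION & SPEC =====
def Spec_find_positive_keywords_py (text : String) (keywords : List String) (out : List String × List String) : Prop := out = find_positive_keywords_py_alt text keywords
instance (text : String) (keywords : List String) (out : List String × List String) : Decidable (Spec_find_positive_keywords_py text keywords out) := by unfold Spec_find_positive_keywords_py; infer_instance

-- ===== CLAIM (what is proved, stated in full; the proofs are below) =====
def Claim_equal_find_positive_keywords_py : Prop := ∀ (text : String) (keywords : List String), Dom_find_positive_keywords_py text keywords → Spec_find_positive_keywords_py text keywords (find_positive_keywords_py text keywords)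

-- ===== LEMMAS AND PROOFS =====

-- lower is idempotent
theorem pv_lowerChar_idem (c : Char) : PySem.Chars.lowerChar (PySem.Chars.lowerChar c) = PySem.Chars.lowerChar c := by
  unfold PySem.Chars.lowerChar PySem.Chars.isupper
  split_ifs with h1 h2 <;> try rfl
  exfalso
  simp [Char.le_def] at h1 h2
  obtain ⟨a, b⟩ := h1
  have ha : 65 ≤ c.toNat := UInt32.le_iff_toNat_le.mp a
  have hb : c.toNat ≤ 90 := UInt32.le_iff_toNat_le.mp b
  have hv : (c.toNat + 32).isValidChar := by unfold Nat.isValidChar; omega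
  have hx : (Char.ofNat (c.toNat + 32)).toNat = c.toNat + 32 := by simp [Char.ofNat, hv]
  have h2' : (Char.ofNat (c.toNat + 32)).toNat ≤ 90 := UInt32.le_iff_toNat_le.mp h2.2
  omega

theorem pv_lower_idem (s : List Char) :
    PySem.Chars.lower (PySem.Chars.lower s) = PySem.Chars.lower s := by
  simp [PySem.Chars.lower, pv_lowerChar_idem]

def pvNonSp (c : Char) : Bool := !PySem.Chars.isspace c

def pvW (s : List Char) : List (List Char) :=
  match h : s.dropWhile PySem.Chars.isspace with
  | [] => []
  | c :: r => (c :: r.takeWhile pvNonSp) :: pvW (r.dropWhile pvNonSp)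
termination_by s.length
decreasing_by
  have h1 : (s.dropWhile PySem.Chars.isspace).length ≤ s.length := by
    simpa using List.Sublist.length_le (List.dropWhile_sublist _)
  have h2 : (r.dropWhile pvNonSp).length ≤ r.length := by
    simpa using List.Sublist.length_le (List.dropWhile_sublist _)
  rw [h] at h1; simp at h1; omega

theorem pvW_drop_nil (s : List Char) (h : s.dropWhile PySem.Chars.isspace = []) : pvW s = [] := by
  rw [pvW]; split <;> simp_all

theorem pvW_drop_cons (s : List Char) (c : Char) (r : List Char)
    (h : s.dropWhile PySem.Chars.isspace = c :: r) :
    pvW s = (c :: r.takeWhile pvNonSp) :: pvW (r.dropWhile pvNonSp) := by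
  rw [pvW]; split
  · simp_all
  · rename_i c' r' heq
    rw [h] at heq
    cases heq
    rfl

theorem pvW_nil : pvW [] = [] := pvW_drop_nil [] rfl

theorem pvW_cons_space (c : Char) (s : List Char) (hs : PySem.Chars.isspace c = true) :
    pvW (c :: s) = pvW s := by
  rw [pvW, pvW, List.dropWhile_cons_of_pos hs]

theorem pvW_cons_nonspace (c : Char) (s : List Char) (hs : PySem.Chars.isspace c = false) :
    pvW (c :: s) = (c :: s.takeWhile pvNonSp) :: pvW (s.dropWhile pvNonSp) :=
  pvW_drop_cons _ _ _ (by rw [List.dropWhile_cons_of_neg (by simp [hs])])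

theorem pv_go_eq (s : List Char) : ∀ (cur : List Char) (acc : List (List Char)),
    PySem.Chars.split₀.go s cur acc =
      acc.reverse ++ (if cur.isEmpty then pvW s
        else (cur.reverse ++ s.takeWhile pvNonSp) :: pvW (s.dropWhile pvNonSp)) := by
  induction s with
  | nil =>
    intro cur acc
    simp only [PySem.Chars.split₀.go]
    cases cur <;> simp [pvW_nil]
  | cons c rest ih =>
    intro cur acc
    simp only [PySem.Chars.split₀.go]
    by_cases hs : PySem.Chars.isspace c
    · rw [if_pos hs]
      cases cur with
      | nil =>
        simp only [List.isEmpty_nil, if_pos, if_true]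
        rw [ih [] acc, pvW_cons_space c rest hs]
        simp
      | cons x xs =>
        simp only [List.isEmpty_cons, if_neg]
        rw [ih [] ((x::xs).reverse :: acc)]
        have ht : (c :: rest).takeWhile pvNonSp = [] :=
          List.takeWhile_cons_of_neg (by simp [pvNonSp, hs])
        have hd : (c :: rest).dropWhile pvNonSp = c :: rest :=
          List.dropWhile_cons_of_neg (by simp [pvNonSp, hs])
        rw [ht, hd, pvW_cons_space c rest hs]
        simp
    · have hs' : PySem.Chars.isspace c = false := by simpa using hs
      rw [if_neg hs]
      rw [ih (c :: cur) acc]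
      have ht : (c :: rest).takeWhile pvNonSp = c :: rest.takeWhile pvNonSp :=
        List.takeWhile_cons_of_pos (by simp [pvNonSp, hs'])
      have hd : (c :: rest).dropWhile pvNonSp = rest.dropWhile pvNonSp :=
        List.dropWhile_cons_of_pos (by simp [pvNonSp, hs'])
      cases cur with
      | nil =>
        rw [pvW_cons_nonspace c rest hs']
        simp
      | cons x xs =>
        rw [ht, hd]
        simp

theorem pv_split₀_eq_pvW (s : List Char) : PySem.Chars.split₀ s = pvW s := by
  rw [PySem.Chars.split₀, pv_go_eq]
  simp

theorem pvW_words (s : List Char) :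
    ∀ w ∈ pvW s, w ≠ [] ∧ ∀ c ∈ w, PySem.Chars.isspace c = false := by
  induction s using pvW.induct with
  | case1 s h => rw [pvW_drop_nil s h]; simp
  | case2 s c r h ih =>
    rw [pvW_drop_cons s c r h]
    intro w hw
    rcases List.mem_cons.mp hw with hw | hw
    · subst hw
      refine ⟨by simp, ?_⟩
      intro x hx
      rcases List.mem_cons.mp hx with hx | hx
      · subst hx
        have := List.head?_dropWhile_not PySem.Chars.isspace s
        rw [h] at this; simpa using this
      · have := List.mem_takeWhile_imp hx
        simpa [pvNonSp] using this
    · exact ih w hw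

theorem pv_all_space_dropWhile (t : List Char) (ht : ∀ c ∈ t, PySem.Chars.isspace c = true) :
    t.dropWhile PySem.Chars.isspace = [] :=
  List.dropWhile_eq_nil_iff.mpr (by intro x hx; simpa using ht x hx)

theorem pvW_all_space (t : List Char) (ht : ∀ c ∈ t, PySem.Chars.isspace c = true) :
    pvW t = [] := pvW_drop_nil t (pv_all_space_dropWhile t ht)

-- takeWhile/dropWhile across an all-nonspace block followed by a space
theorem pv_take_block (u : List Char) (hu : ∀ c ∈ u, PySem.Chars.isspace c = false)
    (x : Char) (hx : PySem.Chars.isspace x = true) (v : List Char) :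
    (u ++ x :: v).takeWhile pvNonSp = u ∧ (u ++ x :: v).dropWhile pvNonSp = x :: v := by
  induction u with
  | nil => constructor <;> simp [List.takeWhile_cons, List.dropWhile_cons, pvNonSp, hx]
  | cons a u ih =>
    have ha : pvNonSp a = true := by simp [pvNonSp, hu a (by simp)]
    have := ih (fun c hc => hu c (by simp [hc]))
    constructor <;> simp [List.takeWhile_cons, List.dropWhile_cons, ha, this.1, this.2]

theorem pvW_append_space (t : List Char) (ht : ∀ c ∈ t, PySem.Chars.isspace c = true) :
    ∀ s, pvW (s ++ t) = pvW s := by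
  have main : ∀ n (s : List Char), s.length ≤ n → pvW (s ++ t) = pvW s := by
    intro n
    induction n with
    | zero =>
      intro s hs
      have : s = [] := List.eq_nil_of_length_eq_zero (Nat.le_zero.mp hs)
      subst this
      simp [pvW_nil, pvW_all_space t ht]
    | succ n ih =>
      intro s hs
      cases h : s.dropWhile PySem.Chars.isspace with
      | nil =>
        have hsp : ∀ c ∈ s, PySem.Chars.isspace c = true := by
          have := List.dropWhile_eq_nil_iff.mp h
          exact fun c hc => by simpa using this c hc
        rw [pvW_all_space s hsp, pvW_all_space (s ++ t) (by
          intro c hc; rcases List.mem_append.mp hc with hc | hc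
          exacts [hsp c hc, ht c hc])]
      | cons c r =>
        have hd2 : (s ++ t).dropWhile PySem.Chars.isspace = c :: (r ++ t) := by
          rw [List.dropWhile_append, h]; simp
        have hlen : r.length < s.length := by
          have := List.Sublist.length_le (List.dropWhile_sublist (p := PySem.Chars.isspace) (l := s))
          rw [h] at this; simp at this; omega
        rw [pvW_drop_cons _ _ _ hd2, pvW_drop_cons _ _ _ h]
        cases hrd : r.dropWhile pvNonSp with
        | nil =>
          have hrn : ∀ c ∈ r, pvNonSp c = true := by
            have := List.dropWhile_eq_nil_iff.mp hrd
            exact fun c hc => by simpa using this c hc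
          have htk : r.takeWhile pvNonSp = r := List.takeWhile_eq_self_iff.mpr hrn
          cases t with
          | nil => simp [hrd]
          | cons x v =>
            have hxs : PySem.Chars.isspace x = true := ht x (by simp)
            have hb := pv_take_block r (fun c hc => by simpa [pvNonSp] using hrn c hc) x hxs v
            rw [hb.1, hb.2, htk, pvW_cons_space x v hxs,
              pvW_all_space v (fun c hc => ht c (by simp [hc])), pvW_nil]
        | cons y ys =>
          have hys : PySem.Chars.isspace y = true := by
            have := List.head?_dropWhile_not pvNonSp r
            rw [hrd] at this; simpa [pvNonSp] using this
          -- takeWhile and dropWhile stop inside r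
          have h1 : r = r.takeWhile pvNonSp ++ y :: ys := by
            rw [← hrd]; exact (List.takeWhile_append_dropWhile).symm
          have hb := pv_take_block (r.takeWhile pvNonSp)
            (fun c hc => by simpa [pvNonSp] using List.mem_takeWhile_imp hc) y hys (ys ++ t)
          have h2 : r ++ t = r.takeWhile pvNonSp ++ y :: (ys ++ t) := by
            conv_lhs => rw [h1]
            simp
          have hys_len : ys.length ≤ n := by
            have := List.Sublist.length_le (List.dropWhile_sublist (p := pvNonSp) (l := r))
            rw [hrd] at this; simp at this; omega
          rw [h2, hb.1, hb.2, pvW_cons_space y (ys ++ t) hys, pvW_cons_space y ys hys,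
            ih ys hys_len]
  intro s; exact main s.length s le_rfl

-- split() of " ".join(l) gives l back, for genuine words
theorem pvW_join (l : List (List Char))
    (hl : ∀ w ∈ l, w ≠ [] ∧ ∀ c ∈ w, PySem.Chars.isspace c = false) :
    pvW (PySem.Chars.join ([' ']) l) = l := by
  induction l with
  | nil => simp [PySem.Chars.join, List.intercalate, pvW_nil]
  | cons w l ih =>
    obtain ⟨hw, hwc⟩ := hl w (by simp)
    cases w with
    | nil => exact absurd rfl hw
    | cons a u =>
      have ha : PySem.Chars.isspace a = false := hwc a (by simp)
      cases l with
      | nil =>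
        have : PySem.Chars.join [' '] [a :: u] = a :: u := by
          simp [PySem.Chars.join, List.intercalate, List.intersperse]
        rw [this, pvW_cons_nonspace a u ha]
        have htk : u.takeWhile pvNonSp = u :=
          List.takeWhile_eq_self_iff.mpr (fun c hc => by simp [pvNonSp, hwc c (by simp [hc])])
        have hdr : u.dropWhile pvNonSp = [] :=
          List.dropWhile_eq_nil_iff.mpr (fun c hc => by simp [pvNonSp, hwc c (by simp [hc])])
        rw [htk, hdr, pvW_nil]
      | cons w' l' =>
        have hjoin : PySem.Chars.join [' '] ((a :: u) :: w' :: l') =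
            (a :: u) ++ ' ' :: PySem.Chars.join [' '] (w' :: l') := by
          simp [PySem.Chars.join, List.intercalate, List.intersperse]
        rw [hjoin]
        have hb := pv_take_block u (fun c hc => hwc c (by simp [hc])) ' ' (by decide)
          (PySem.Chars.join [' '] (w' :: l'))
        rw [show ((a :: u) ++ ' ' :: PySem.Chars.join [' '] (w' :: l')) =
              a :: (u ++ ' ' :: PySem.Chars.join [' '] (w' :: l')) by simp,
           pvW_cons_nonspace a _ ha, hb.1, hb.2,
           pvW_cons_space ' ' _ (by decide),
           ih (fun x hx => hl x (by simp [hx]))]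

-- strip does not change the word list
theorem pvW_lstrip (s : List Char) : pvW (PySem.Chars.lstrip s) = pvW s := by
  rw [PySem.Chars.lstrip, pvW, pvW, List.dropWhile_idempotent]

theorem pvW_rstrip (s : List Char) : pvW (PySem.Chars.rstrip s) = pvW s := by
  have hdecomp : s = PySem.Chars.rstrip s ++ (s.reverse.takeWhile PySem.Chars.isspace).reverse := by
    rw [PySem.Chars.rstrip]
    conv_lhs => rw [← List.reverse_reverse s,
      ← List.takeWhile_append_dropWhile (p := PySem.Chars.isspace) (l := s.reverse)]
    rw [List.reverse_append]
  conv_rhs => rw [hdecomp]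
  rw [pvW_append_space _ (fun c hc => by
    have := List.mem_takeWhile_imp (List.mem_reverse.mp hc)
    simpa using this)]

theorem pv_split₀_strip (s : List Char) :
    PySem.Chars.split₀ (PySem.Chars.strip s) = PySem.Chars.split₀ s := by
  rw [pv_split₀_eq_pvW, pv_split₀_eq_pvW, PySem.Chars.strip, pvW_rstrip, pvW_lstrip]

-- separator at position p
def pvSepAt (t : List Char) (p : Nat) : Prop :=
  t[p]? = some '.' ∧ (t[p+1]? = some ' ' ∨ t[p+1]? = some '\n')

theorem pv_prefix2_iff (a b : Char) (l : List Char) (k : Nat) :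
    [a, b] <+: l.drop k ↔ l[k]? = some a ∧ l[k+1]? = some b := by
  constructor
  · rintro ⟨r, hr⟩
    have h0 : (l.drop k)[0]? = some a := by rw [← hr]; rfl
    have h1 : (l.drop k)[1]? = some b := by rw [← hr]; rfl
    rw [List.getElem?_drop] at h0 h1
    exact ⟨by simpa using h0, by simpa using h1⟩
  · rintro ⟨h0, h1⟩
    rcases hd : l.drop k with _ | ⟨x, rest⟩
    · have h0' : (l.drop k)[0]? = some a := by rw [List.getElem?_drop]; simpa using h0
      rw [hd] at h0'; simp at h0' 
    · rcases rest with _ | ⟨y, rest'⟩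
      · have h1' : (l.drop k)[1]? = some b := by rw [List.getElem?_drop]; simpa using h1
        rw [hd] at h1'; simp at h1' 
      · have hx : x = a := by
          have h0' : (l.drop k)[0]? = some a := by rw [List.getElem?_drop]; simpa using h0
          rw [hd] at h0'; simpa using h0'
        have hy : y = b := by
          have h1' : (l.drop k)[1]? = some b := by rw [List.getElem?_drop]; simpa using h1
          rw [hd] at h1'; simpa using h1'
        exact ⟨rest', by simp [hx, hy, hd]⟩

-- starts list characterization
theorem pv_startsB_eq (t : List Char) :
    pvStartsB t = 0 :: ((PySem.List.pyRange 0 ((t.length : Int) - 1) 1).filter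
      (fun p => PySem.List.pyGetD t p ' ' == '.' &&
         (PySem.List.pyGetD t (p + 1) ' ' == ' ' || PySem.List.pyGetD t (p + 1) ' ' == '\n'))).map
      (fun p => p.toNat + 2) := by
  rw [pvStartsB, PySem.List.foldl_append_if]
  rfl

theorem pv_mem_startsB (t : List Char) (x : Nat) :
    x ∈ pvStartsB t ↔ x = 0 ∨ ∃ p : Nat, pvSepAt t p ∧ x = p + 2 := by
  rw [pv_startsB_eq]
  simp only [List.mem_cons, List.mem_map, List.mem_filter, PySem.List.mem_pyRange_one]
  constructor
  · rintro (h | ⟨p, ⟨⟨hp0, hp1⟩, hcond⟩, hx⟩)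
    · exact Or.inl h
    · right
      refine ⟨p.toNat, ?_, by omega⟩
      simp only [Bool.and_eq_true, Bool.or_eq_true, beq_iff_eq] at hcond
      have hplen : p.toNat + 1 < t.length := by omega
      have e0 : PySem.List.pyGetD t p ' ' = t[p.toNat] := by
        rw [PySem.List.pyGetD_eq_getElem t ' ' hp0 (by omega)]
      have e1 : PySem.List.pyGetD t (p+1) ' ' = t[p.toNat + 1] := by
        rw [PySem.List.pyGetD_eq_getElem t ' ' (by omega) (by omega)]
        congr 1; omega
      rw [e0, e1] at hcond
      refine ⟨by rw [List.getElem?_eq_getElem (by omega)]; simp [hcond.1], ?_⟩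
      rcases hcond.2 with h | h
      · exact Or.inl (by rw [List.getElem?_eq_getElem hplen]; simp [h])
      · exact Or.inr (by rw [List.getElem?_eq_getElem hplen]; simp [h])
  · rintro (h | ⟨p, ⟨hdot, hnext⟩, hx⟩)
    · exact Or.inl h
    · right
      have hplen : p + 1 < t.length := by
        rcases hnext with h | h <;> exact (List.getElem?_eq_some_iff.mp h).1
      refine ⟨(p : Int), ⟨⟨by omega, by omega⟩, ?_⟩, by omega⟩
      have e0 : PySem.List.pyGetD t (p : Int) ' ' = t[p] := by
        rw [PySem.List.pyGetD_eq_getElem t ' ' (by omega) (by push_cast; omega)]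
        congr 1
      have e1 : PySem.List.pyGetD t ((p : Int)+1) ' ' = t[p + 1] := by
        rw [PySem.List.pyGetD_eq_getElem t ' ' (by omega) (by push_cast; omega)]
        congr 1
      simp only [Bool.and_eq_true, Bool.or_eq_true, beq_iff_eq, e0, e1]
      have hdot' : t[p] = '.' := by
        have := List.getElem?_eq_getElem (l := t) (i := p) (by omega)
        rw [this] at hdot; simpa using hdot
      refine ⟨hdot', ?_⟩
      rcases hnext with h | h
      · left
        have := List.getElem?_eq_getElem (l := t) (i := p+1) hplen
        rw [this] at h; simpa using h
      · right
        have := List.getElem?_eq_getElem (l := t) (i := p+1) hplen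
        rw [this] at h; simpa using h

theorem pv_startsB_sorted (t : List Char) : (pvStartsB t).Pairwise (· < ·) := by
  rw [pv_startsB_eq]
  refine List.Pairwise.cons ?_ ?_
  · intro x hx
    rcases List.mem_map.mp hx with ⟨p, _, hp⟩
    omega
  · rw [List.pairwise_map]
    refine List.Pairwise.imp_of_mem ?_ ((PySem.List.pairwise_lt_pyRange_one 0 ((t.length : Int) - 1)).filter _)
    intro a b ha hb hab
    have ha0 : 0 ≤ a := by
      have := (List.mem_filter.mp ha).1
      exact (PySem.List.mem_pyRange_one.mp this).1
    have hb0 : 0 ≤ b := by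
      have := (List.mem_filter.mp hb).1
      exact (PySem.List.mem_pyRange_one.mp this).1
    omega

theorem pvLookupB_spec (idx : Nat) : ∀ (l : List Nat) (s : Nat), l.Pairwise (· < ·) →
    (∀ x ∈ l, s < x) → s ≤ idx →
    (pvLookupB idx l s = s ∨ pvLookupB idx l s ∈ l) ∧ pvLookupB idx l s ≤ idx ∧
      s ≤ pvLookupB idx l s ∧ ∀ x ∈ l, x ≤ idx → x ≤ pvLookupB idx l s := by
  intro l
  induction l with
  | nil => intro s _ _ hs; simp [pvLookupB, hs]
  | cons s0 rest ih =>
    intro s hp hlt hs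
    rw [pvLookupB]
    by_cases hidx : idx < s0
    · rw [if_pos hidx]
      refine ⟨Or.inl rfl, hs, le_rfl, ?_⟩
      intro x hx hxle
      rcases List.mem_cons.mp hx with h | h
      · omega
      · have := (List.pairwise_cons.mp hp).1 x h
        omega
    · rw [if_neg hidx]
      have h0 := ih s0 (List.pairwise_cons.mp hp).2 (fun x hx => (List.pairwise_cons.mp hp).1 x hx) (by omega)
      have hss0 : s < s0 := hlt s0 (by simp)
      refine ⟨?_, h0.2.1, by have := h0.2.2.1; omega, ?_⟩
      · rcases h0.1 with h | h
        · exact Or.inr (by simp [h])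
        · exact Or.inr (by simp [h])
      · intro x hx hxle
        rcases List.mem_cons.mp hx with h | h
        · subst h; exact h0.2.2.1
        · exact h0.2.2.2 x h hxle

theorem pv_go_zero (s sub : List Char) :
    PySem.Chars.rfind.go s sub 0 = if sub.isPrefixOf s then 0 else -1 := by
  simp [PySem.Chars.rfind.go]

theorem pv_go_succ (s sub : List Char) (j : Nat) : PySem.Chars.rfind.go s sub (j+1) =
    if sub.isPrefixOf (s.drop (j+1)) then ((j:Int)+1) else PySem.Chars.rfind.go s sub j := by
  rw [PySem.Chars.rfind.go]
  push_cast
  rfl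

theorem pv_go_spec (s sub : List Char) : ∀ n : Nat,
    (PySem.Chars.rfind.go s sub n = -1 ∧ ∀ j ≤ n, ¬ sub <+: s.drop j) ∨
    (∃ k : Nat, PySem.Chars.rfind.go s sub n = (k : Int) ∧ k ≤ n ∧
      sub <+: s.drop k ∧ ∀ j, k < j → j ≤ n → ¬ sub <+: s.drop j) := by
  intro n
  induction n with
  | zero =>
    rw [pv_go_zero]
    by_cases h : sub <+: s
    · right
      exact ⟨0, by simp [List.isPrefixOf_iff_prefix, h], le_rfl, by simpa using h, by omega⟩
    · left
      refine ⟨by simp [List.isPrefixOf_iff_prefix, h], ?_⟩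
      intro j hj
      interval_cases j
      simpa using h
  | succ n ih =>
    rw [pv_go_succ]
    by_cases h : sub <+: s.drop (n+1)
    · right
      exact ⟨n+1, by simp [List.isPrefixOf_iff_prefix, h], le_rfl, h, by omega⟩
    · rw [if_neg (by simp [List.isPrefixOf_iff_prefix, h])]
      rcases ih with ⟨he, hall⟩ | ⟨k, he, hk, hpre, hmax⟩
      · left
        refine ⟨he, ?_⟩
        intro j hj
        rcases Nat.lt_or_ge j (n+1) with hlt | hge
        · exact hall j (by omega)
        · have : j = n + 1 := by omega
          subst this; exact h
      · right
        refine ⟨k, he, by omega, hpre, ?_⟩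
        intro j hjk hj
        rcases Nat.lt_or_ge j (n+1) with hlt | hge
        · exact hmax j hjk (by omega)
        · have : j = n + 1 := by omega
          subst this; exact h

theorem pv_rfindFrom_nat (t sub : List Char) (idx : Nat) (h : idx ≤ t.length) :
    PySem.Chars.rfindFrom t sub 0 (some (idx : Int)) = PySem.Chars.rfind (t.take idx) sub := by
  unfold PySem.Chars.rfindFrom
  have h1 : ¬ ((t.length : Int) < (idx : Int)) := by push_cast; omega
  have h2 : ¬ ((idx : Int) < 0) := by omega
  simp only [if_neg h1, if_neg h2, if_neg (show ¬ ((0:Int) < 0) by omega)]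
  simp only [Int.toNat_natCast, Int.toNat_zero, List.drop_zero]
  split_ifs with h3 <;> omega

-- rfind of a two-char pattern bounded by idx, in terms of character positions
theorem pv_rfind_pat_spec (t : List Char) (idx : Nat) (hidx : idx ≤ t.length) (a b : Char) :
    (PySem.Chars.rfindFrom t [a,b] 0 (some (idx : Int)) = -1 ∧
       ∀ p : Nat, t[p]? = some a → t[p+1]? = some b → ¬ (p + 2 ≤ idx)) ∨
    (∃ k : Nat, PySem.Chars.rfindFrom t [a,b] 0 (some (idx : Int)) = (k : Int) ∧
       t[k]? = some a ∧ t[k+1]? = some b ∧ k + 2 ≤ idx ∧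
       ∀ p : Nat, t[p]? = some a → t[p+1]? = some b → p + 2 ≤ idx → p ≤ k) := by
  rw [pv_rfindFrom_nat t [a,b] idx hidx, PySem.Chars.rfind]
  have hlen : (t.take idx).length = idx := by simp [hidx]
  have hiff : ∀ j : Nat, [a,b] <+: (t.take idx).drop j ↔
      (t[j]? = some a ∧ t[j+1]? = some b ∧ j + 2 ≤ idx) := by
    intro j
    rw [List.drop_take, List.prefix_take_iff, pv_prefix2_iff]
    constructor
    · rintro ⟨⟨h0, h1⟩, hl⟩
      have : j + 2 ≤ idx := by simp at hl; omega
      exact ⟨h0, h1, this⟩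
    · rintro ⟨h0, h1, h2⟩
      exact ⟨⟨h0, h1⟩, by simp; omega⟩
  rcases pv_go_spec (t.take idx) [a,b] ((t.take idx).length) with ⟨he, hall⟩ | ⟨k, he, hk, hpre, hmax⟩
  · left
    refine ⟨he, ?_⟩
    intro p h0 h1 h2
    exact hall p (by omega) ((hiff p).mpr ⟨h0, h1, h2⟩)
  · right
    obtain ⟨h0, h1, h2⟩ := (hiff k).mp hpre
    refine ⟨k, he, h0, h1, h2, ?_⟩
    intro p hp0 hp1 hp2
    by_contra hcon
    exact hmax p (by omega) (by omega) ((hiff p).mpr ⟨hp0, hp1, hp2⟩)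

theorem pv_sentStart_eq (t : List Char) (idx : Nat) (hidx : idx ≤ t.length) :
    (max (if 0 ≤ PySem.Chars.rfindFrom t (". ".toList) 0 (some (idx : Int)) then
            PySem.Chars.rfindFrom t (". ".toList) 0 (some (idx : Int)) + 2 else 0)
      (max (if 0 ≤ PySem.Chars.rfindFrom t (".\n".toList) 0 (some (idx : Int)) then
              PySem.Chars.rfindFrom t (".\n".toList) 0 (some (idx : Int)) + 2 else 0) 0))
    = ((pvLookupB idx (pvStartsB t) 0 : Nat) : Int) := by
  have e1 : ". ".toList = ['.', ' '] := rfl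
  have e2 : ".\n".toList = ['.', '\n'] := rfl
  rw [e1, e2]
  -- B side structure
  obtain ⟨rest, hrest⟩ : ∃ rest, pvStartsB t = 0 :: rest := ⟨_, pv_startsB_eq t⟩
  have hsorted := pv_startsB_sorted t
  rw [hrest] at hsorted
  have htail := (List.pairwise_cons.mp hsorted).2
  have hhead := (List.pairwise_cons.mp hsorted).1
  have hL0 : pvLookupB idx (pvStartsB t) 0 = pvLookupB idx rest 0 := by
    rw [hrest, pvLookupB, if_neg (by omega)]
  rw [hL0]
  have hspec := pvLookupB_spec idx rest 0 htail hhead (Nat.zero_le idx)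
  set L := pvLookupB idx rest 0 with hLdef
  have memRest : ∀ x : Nat, x ∈ rest ↔ ∃ p : Nat, pvSepAt t p ∧ x = p + 2 := by
    intro x
    constructor
    · intro hx
      rcases (pv_mem_startsB t x).mp (by rw [hrest]; exact List.mem_cons_of_mem _ hx) with h | h
      · exfalso; have := hhead x hx; omega
      · exact h
    · rintro ⟨p, hsep, hx⟩
      have : x ∈ pvStartsB t := (pv_mem_startsB t x).mpr (Or.inr ⟨p, hsep, hx⟩)
      rw [hrest] at this
      rcases List.mem_cons.mp this with h | h
      · omega
      · exact h
  rcases pv_rfind_pat_spec t idx hidx '.' ' ' with ⟨hr1, hall1⟩ | ⟨k1, hr1, h10, h11, h12, hmax1⟩ <;>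
  rcases pv_rfind_pat_spec t idx hidx '.' '\n' with ⟨hr2, hall2⟩ | ⟨k2, hr2, h20, h21, h22, hmax2⟩
  all_goals rw [hr1, hr2]
  · -- both -1 : L must be 0
    have : L = 0 := by
      rcases hspec.1 with h | h
      · exact h
      · exfalso
        obtain ⟨p, hsep, hLp⟩ := (memRest L).mp h
        rcases hsep.2 with hs | hs
        · exact hall1 p hsep.1 hs (by have := hspec.2.1; omega)
        · exact hall2 p hsep.1 hs (by have := hspec.2.1; omega)
    simp [this]
  · -- r1 = -1, r2 = k2
    rw [if_pos (show (0:Int) ≤ (k2:Int) by omega)]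
    have hk2L : k2 + 2 ≤ L :=
      hspec.2.2.2 (k2+2) ((memRest _).mpr ⟨k2, ⟨h20, Or.inr h21⟩, rfl⟩) (by omega)
    have hLle : L ≤ k2 + 2 := by
      rcases hspec.1 with h | h
      · omega
      · obtain ⟨p, hsep, hLp⟩ := (memRest L).mp h
        have hpidx : p + 2 ≤ idx := by have := hspec.2.1; omega
        rcases hsep.2 with hs | hs
        · exact absurd hpidx (hall1 p hsep.1 hs)
        · have := hmax2 p hsep.1 hs hpidx; omega
    have : L = k2 + 2 := le_antisymm hLle hk2L
    rw [this]; push_cast; omega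
  · -- r1 = k1, r2 = -1 (symmetric)
    rw [if_pos (show (0:Int) ≤ (k1:Int) by omega)]
    have hk1L : k1 + 2 ≤ L :=
      hspec.2.2.2 (k1+2) ((memRest _).mpr ⟨k1, ⟨h10, Or.inl h11⟩, rfl⟩) (by omega)
    have hLle : L ≤ k1 + 2 := by
      rcases hspec.1 with h | h
      · omega
      · obtain ⟨p, hsep, hLp⟩ := (memRest L).mp h
        have hpidx : p + 2 ≤ idx := by have := hspec.2.1; omega
        rcases hsep.2 with hs | hs
        · have := hmax1 p hsep.1 hs hpidx; omega
        · exact absurd hpidx (hall2 p hsep.1 hs)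
    have : L = k1 + 2 := le_antisymm hLle hk1L
    rw [this]; push_cast; omega
  · -- both found: L = max(k1,k2)+2
    rw [if_pos (show (0:Int) ≤ (k1:Int) by omega), if_pos (show (0:Int) ≤ (k2:Int) by omega)]
    have hk1L : k1 + 2 ≤ L :=
      hspec.2.2.2 (k1+2) ((memRest _).mpr ⟨k1, ⟨h10, Or.inl h11⟩, rfl⟩) (by omega)
    have hk2L : k2 + 2 ≤ L :=
      hspec.2.2.2 (k2+2) ((memRest _).mpr ⟨k2, ⟨h20, Or.inr h21⟩, rfl⟩) (by omega)
    have hLle : L ≤ max k1 k2 + 2 := by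
      rcases hspec.1 with h | h
      · omega
      · obtain ⟨p, hsep, hLp⟩ := (memRest L).mp h
        have hpidx : p + 2 ≤ idx := by have := hspec.2.1; omega
        rcases hsep.2 with hs | hs
        · have := hmax1 p hsep.1 hs hpidx; omega
        · have := hmax2 p hsep.1 hs hpidx; omega
    have : L = max k1 k2 + 2 := by omega
    rw [this]; push_cast; omega

-- the first-conjunction break: A's re-join loop vs B's option-returning scan
theorem pv_conj_rel (pfx : List Char) : ∀ ws : List (List Char),
    pvConjLoopA pfx ws = (match pvConjTailB ws with
      | none => pfx
      | some r => PySem.Chars.join (" ".toList) r) := by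
  intro ws
  induction ws with
  | nil => simp [pvConjLoopA, pvConjTailB]
  | cons w rest ih =>
    rw [pvConjLoopA, pvConjTailB]
    split_ifs with h
    · rfl
    · exact ih

theorem pv_conjTail_mem (ws : List (List Char)) (r : List (List Char))
    (h : pvConjTailB ws = some r) : ∀ w ∈ r, w ∈ ws := by
  induction ws with
  | nil => simp [pvConjTailB] at h
  | cons w rest ih =>
    rw [pvConjTailB] at h
    split_ifs at h with hc
    · cases h
      exact fun x hx => List.mem_cons_of_mem _ hx
    · exact fun x hx => List.mem_cons_of_mem _ (ih h x hx)

-- window equality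

theorem pv_split₀_nil : PySem.Chars.split₀ ([] : List Char) = [] := rfl

theorem pv_join_slice_nil :
    PySem.Chars.join (" ".toList) (PySem.List.slice ([] : List (List Char)) (some (-8)) none) = [] := rfl

theorem pv_window_eq (t : List Char) (idx : Nat) (h : idx ≤ t.length) :
    pvWindowA t idx = pvWindowB t (pvLookupB idx (pvStartsB t) 0) idx := by
  simp only [pvWindowA, pvWindowB]
  rw [pv_sentStart_eq t idx h]
  set x := PySem.List.slice t (some ((pvLookupB idx (pvStartsB t) 0 : Nat) : Int)) (some (idx : Int)) with hx
  have hsplit : PySem.Chars.split₀ (PySem.Chars.strip x) = PySem.Chars.split₀ x := pv_split₀_strip x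
  rw [pv_conj_rel, hsplit]
  cases hct : pvConjTailB (PySem.Chars.split₀ x) with
  | none =>
    by_cases hpfx : PySem.Chars.strip x = []
    · rw [if_pos hpfx]
      have : PySem.Chars.split₀ x = [] := by rw [← hsplit, hpfx, pv_split₀_nil]
      rw [this, pv_join_slice_nil]
    · rw [if_neg hpfx, hsplit]
  | some r =>
    have hwords : ∀ w ∈ r, w ≠ [] ∧ ∀ c ∈ w, PySem.Chars.isspace c = false := by
      intro w hw
      have hmem : w ∈ PySem.Chars.split₀ x := pv_conjTail_mem _ _ hct w hw
      rw [pv_split₀_eq_pvW] at hmem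
      exact pvW_words x w hmem
    have hsj : PySem.Chars.split₀ (PySem.Chars.join (" ".toList) r) = r := by
      rw [pv_split₀_eq_pvW]
      exact pvW_join r hwords
    by_cases hj : PySem.Chars.join (" ".toList) r = []
    · rw [if_pos hj]
      have : r = [] := by rw [← hsj, hj, pv_split₀_nil]
      rw [this, pv_join_slice_nil]
    · rw [if_neg hj, hsj]

-- B's loop in terms of A's loop
theorem pv_findFrom_le (t sub : List Char) (pos : Nat) (hp : pos ≤ t.length) :
    PySem.Chars.findFrom t sub (pos : Int) none ≤ (t.length : Int) := by
  rw [PySem.Chars.findFrom_natCast t sub pos hp]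
  split_ifs with h
  · omega
  · have h2 := PySem.Chars.find_le_length (t.drop pos) sub
    rw [List.length_drop] at h2
    omega

theorem pv_loop_eq (t kw : List Char) (pos : Nat) (hpos : pos ≤ t.length) (bucket : Option Bool) :
    pvLoopB t kw (pvStartsB t) pos bucket =
      if PySem.Chars.findFrom t kw (pos : Int) none = -1 then bucket
      else some (pvNegLoopA t kw pos) := by
  suffices H : ∀ fuel (pos : Nat) (bucket : Option Bool), pos ≤ t.length →
      t.length + 1 - pos ≤ fuel →
      pvLoopB t kw (pvStartsB t) pos bucket =
        if PySem.Chars.findFrom t kw (pos : Int) none = -1 then bucket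
        else some (pvNegLoopA t kw pos) by
    exact H (t.length + 1 - pos) pos bucket hpos le_rfl
  intro fuel
  induction fuel with
  | zero => intro pos bucket hp hf; omega
  | succ fuel ih =>
    intro pos bucket hp hf
    rw [pvLoopB, pvNegLoopA]
    by_cases hi : PySem.Chars.findFrom t kw (pos : Int) none = -1
    · simp [hi]
    · have hspec := PySem.Chars.findFrom_natCast_spec t kw pos hp hi
      have hposle : (pos : Int) ≤ PySem.Chars.findFrom t kw (pos : Int) none := hspec.1
      have hpre := hspec.2.1
      have h0 : (0:Int) ≤ PySem.Chars.findFrom t kw (pos : Int) none :=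
        le_trans (by omega) hposle
      have hlen : (PySem.Chars.findFrom t kw (pos : Int) none).toNat + kw.length ≤ t.length := by
        have h2 := hpre.length_le
        rw [List.length_drop] at h2
        have h3 := pv_findFrom_le t kw pos hp
        omega
      simp only [if_neg hi]
      rw [pv_window_eq t ((PySem.Chars.findFrom t kw (pos : Int) none).toNat) (by omega)]
      by_cases hany : (pvNegPhrases.any fun neg =>
          PySem.Chars.isIn neg
            (pvWindowB t (pvLookupB (PySem.Chars.findFrom t kw (pos:Int) none).toNat (pvStartsB t) 0)
              (PySem.Chars.findFrom t kw (pos:Int) none).toNat)) = true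
      · simp only [if_pos hany]
        by_cases hg : pos < (PySem.Chars.findFrom t kw (pos:Int) none).toNat + kw.length ∧
            pos ≤ t.length
        · rw [dif_pos hg, dif_pos hg]
          rw [ih ((PySem.Chars.findFrom t kw (pos:Int) none).toNat + kw.length) (some true)
            hlen (by omega)]
          by_cases hi2 : PySem.Chars.findFrom t kw
              (((PySem.Chars.findFrom t kw (pos:Int) none).toNat + kw.length : Nat) : Int) none = -1
          · rw [if_pos hi2, pvNegLoopA, if_pos hi2]
          · rw [if_neg hi2]
        · rw [dif_neg hg, dif_neg hg]
      · simp only [if_neg hany]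

-- ===== VERDICT (by name: the statement is the Claim_ definition above) =====
theorem find_positive_keywords_py_spec : Claim_equal_find_positive_keywords_py := by
  intro text keywords _
  unfold Spec_find_positive_keywords_py
  simp only [find_positive_keywords_py, find_positive_keywords_py_alt]
  apply PySem.List.foldl_congr_mem
  intro acc kw _
  have hll : PySem.Chars.lower (PySem.Chars.lower text.toList) = PySem.Chars.lower text.toList :=
    pv_lower_idem _
  have hkk : PySem.Chars.lower (PySem.Chars.lower kw.toList) = PySem.Chars.lower kw.toList :=
    pv_lower_idem _
  have hloop := pv_loop_eq (PySem.Chars.lower text.toList) (PySem.Chars.lower kw.toList) 0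
    (Nat.zero_le _) none
  have hisneg : pvIsNegA (PySem.Chars.lower text.toList) (PySem.Chars.lower kw.toList) =
      pvNegLoopA (PySem.Chars.lower text.toList) (PySem.Chars.lower kw.toList) 0 := by
    rw [pvIsNegA, hll, hkk]
  rw [hloop]
  by_cases hc : PySem.Chars.isIn (PySem.Chars.lower kw.toList) (PySem.Chars.lower text.toList) = true
  · have hfind : ¬ (PySem.Chars.findFrom (PySem.Chars.lower text.toList)
        (PySem.Chars.lower kw.toList) ((0:Nat) : Int) none = -1) := by
      simp only [Nat.cast_zero, PySem.Chars.findFrom_zero]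
      rw [PySem.Chars.find_eq_neg_one_iff]
      simpa [PySem.Chars.isIn_iff_infix] using hc
    rw [if_pos hc, if_neg hfind, hisneg]
    cases hneg : pvNegLoopA (PySem.Chars.lower text.toList) (PySem.Chars.lower kw.toList) 0 <;> simp
  · have hfind : PySem.Chars.findFrom (PySem.Chars.lower text.toList)
        (PySem.Chars.lower kw.toList) ((0:Nat) : Int) none = -1 := by
      simp only [Nat.cast_zero, PySem.Chars.findFrom_zero]
      rw [PySem.Chars.find_eq_neg_one_iff]
      simpa [PySem.Chars.isIn_iff_infix] using hc
    rw [if_neg hc, if_pos hfind]
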